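-- pv_equiv track=rewrite | github.com/Ahsani12/UTS_kecerdasan_buatan_Ain | blind_search.py | dfs
-- ===== SOURCE A (Python) =====
-- graph = {
--     'A': {'Z': 75, 'T': 118, 'S': 140},
--     'Z': {'A': 75, 'O': 71},
--     'O': {'Z': 71, 'S': 151},
--     'T': {'A': 118, 'L': 111},
--     'L': {'T': 111, 'M': 70},
--     'M': {'L': 70, 'D': 75},
--     'D': {'M': 75, 'C': 120},
--     'C': {'D': 120, 'R': 146, 'P': 138},
--     'R': {'C': 146, 'S': 80, 'P': 97},
--     'S': {'A': 140, 'O': 151, 'R': 80, 'F': 99},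
--     'F': {'S': 99, 'B': 211},
--     'P': {'C': 138, 'R': 97, 'B': 101},
--     'B': {'F': 211, 'P': 101, 'G': 90, 'U': 85},
--     'U': {'B': 85, 'H': 98, 'V': 142},
--     'H': {'U': 98, 'E': 86},
--     'E': {'H': 86},
--     'G': {'B': 90}
-- }
--
-- def dfs(start, goal):
--     stack = [[start]]
--     visited = set()
--
--     while stack:
--         path = stack.pop()
--         node = path[-1]
--
--         if node == goal:
--             return path
--
--         if node not in visited:
--             visited.add(node)
--             for neighbor in graph.get(node, {}):
--                 new_path = path + [neighbor]
--                 stack.append(new_path)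
--     return None
-- ===== SOURCE B (Python) =====
-- # The edge weights are irrelevant to dfs, so B keeps only the adjacency lists.
-- adjacency = {
--     'A': ['Z', 'T', 'S'],
--     'Z': ['A', 'O'],
--     'O': ['Z', 'S'],
--     'T': ['A', 'L'],
--     'L': ['T', 'M'],
--     'M': ['L', 'D'],
--     'D': ['M', 'C'],
--     'C': ['D', 'R', 'P'],
--     'R': ['C', 'S', 'P'],
--     'S': ['A', 'O', 'R', 'F'],
--     'F': ['S', 'B'],
--     'P': ['C', 'R', 'B'],
--     'B': ['F', 'P', 'G', 'U'],
--     'U': ['B', 'H', 'V'],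
--     'H': ['U', 'E'],
--     'E': ['H'],
--     'G': ['B']
-- }
--
-- def dfs(start, goal):
--     visited = set()
--
--     def rec(path):
--         node = path[-1]
--         if node == goal:
--             return path
--         if node in visited:
--             return None
--         visited.add(node)
--         # A pops its LIFO stack, so it tries neighbors in reverse insertion order
--         for neighbor in reversed(adjacency.get(node, [])):
--             result = rec(path + [neighbor])
--             if result is not None:
--                 return result
--         return None
--
--     return rec([start])
-- ===== Notes on version B (the rewrite author's own statement) =====
-- stated objective: alternative
-- what changed: Replaces A's iterative worklist (an explicit LIFO stack of whole paths popped in a while loop over a weighted dict-of-dicts) by a recursive DFS over weightless adjacency lists: a nested rec(path) tries neighbors in reversed insertion order and returns the first successful recursive result.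
import Mathlib
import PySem

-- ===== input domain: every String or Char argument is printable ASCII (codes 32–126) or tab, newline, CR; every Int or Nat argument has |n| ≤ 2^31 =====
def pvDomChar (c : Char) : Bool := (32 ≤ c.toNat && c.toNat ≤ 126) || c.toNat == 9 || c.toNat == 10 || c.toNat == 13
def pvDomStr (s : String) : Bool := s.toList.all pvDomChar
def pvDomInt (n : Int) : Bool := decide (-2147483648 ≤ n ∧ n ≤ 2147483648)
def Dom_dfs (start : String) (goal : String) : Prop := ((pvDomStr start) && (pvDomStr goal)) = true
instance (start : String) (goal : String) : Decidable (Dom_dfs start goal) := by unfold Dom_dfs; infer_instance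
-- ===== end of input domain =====

-- B replaces A's iterative worklist (LIFO stack of whole paths) by a recursive DFS over
-- weightless adjacency lists (objective: alternative decomposition; same return value, proved below).

-- ===== PORT A =====
-- the module-level `graph` constant of A (dict of dicts with edge weights)
def graphA : PySem.Dict String (PySem.Dict String Int) := PySem.Dict.ofList
  [ ("A", PySem.Dict.ofList [("Z", 75), ("T", 118), ("S", 140)]),
    ("Z", PySem.Dict.ofList [("A", 75), ("O", 71)]),
    ("O", PySem.Dict.ofList [("Z", 71), ("S", 151)]),
    ("T", PySem.Dict.ofList [("A", 118), ("L", 111)]),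
    ("L", PySem.Dict.ofList [("T", 111), ("M", 70)]),
    ("M", PySem.Dict.ofList [("L", 70), ("D", 75)]),
    ("D", PySem.Dict.ofList [("M", 75), ("C", 120)]),
    ("C", PySem.Dict.ofList [("D", 120), ("R", 146), ("P", 138)]),
    ("R", PySem.Dict.ofList [("C", 146), ("S", 80), ("P", 97)]),
    ("S", PySem.Dict.ofList [("A", 140), ("O", 151), ("R", 80), ("F", 99)]),
    ("F", PySem.Dict.ofList [("S", 99), ("B", 211)]),
    ("P", PySem.Dict.ofList [("C", 138), ("R", 97), ("B", 101)]),
    ("B", PySem.Dict.ofList [("F", 211), ("P", 101), ("G", 90), ("U", 85)]),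
    ("U", PySem.Dict.ofList [("B", 85), ("H", 98), ("V", 142)]),
    ("H", PySem.Dict.ofList [("U", 98), ("E", 86)]),
    ("E", PySem.Dict.ofList [("H", 86)]),
    ("G", PySem.Dict.ofList [("B", 90)]) ]

-- the `while stack:` loop of A; fuel 64 strictly exceeds the loop's iteration count
-- (the visited set caps pops at 1 + the number of directed graph edges = 42)
def dfsLoopA (goal : String) : Nat → List (List String) → PySem.Set String → Option (List String)
  | 0, _, _ => none
  | fuel + 1, stack, visited =>
    match PySem.List.pop? stack with                     -- path = stack.pop()  (stack empty ⇒ loop exits)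
    | none => none                                       -- return None
    | some (path, stack') =>
      match PySem.List.pyGet? path (-1) with             -- node = path[-1]  (paths are never empty)
      | none => none
      | some node =>
        if node == goal then some path                   -- return path
        else if PySem.Set.contains visited node then
          dfsLoopA goal fuel stack' visited
        else
          dfsLoopA goal fuel
            (((PySem.Dict.getD graphA node PySem.Dict.empty).keys).foldl
              (fun st neighbor => st ++ [path ++ [neighbor]]) stack')  -- for neighbor …: stack.append(path+[neighbor])
            (PySem.Set.add visited node)                 -- visited.add(node)

def dfs (start : String) (goal : String) : Option (List String) :=
  dfsLoopA goal 64 [[start]] PySem.Set.empty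

-- ===== PORT B =====
-- B's module-level `adjacency` constant: only the neighbour lists, no weights
def adjacencyB : PySem.Dict String (List String) := PySem.Dict.ofList
  [ ("A", ["Z", "T", "S"]),
    ("Z", ["A", "O"]),
    ("O", ["Z", "S"]),
    ("T", ["A", "L"]),
    ("L", ["T", "M"]),
    ("M", ["L", "D"]),
    ("D", ["M", "C"]),
    ("C", ["D", "R", "P"]),
    ("R", ["C", "S", "P"]),
    ("S", ["A", "O", "R", "F"]),
    ("F", ["S", "B"]),
    ("P", ["C", "R", "B"]),
    ("B", ["F", "P", "G", "U"]),
    ("U", ["B", "H", "V"]),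
    ("H", ["U", "E"]),
    ("E", ["H"]),
    ("G", ["B"]) ]

-- the `for neighbor in …: result = rec(…); if result is not None: return result` loop of B:
-- a structural recursion over the neighbour list that stops at the first success;
-- `rec` itself is passed in as `f`, and the mutable `visited` set is threaded through.
def tryNbrsB (f : List String → PySem.Set String → Option (List String) × PySem.Set String)
    (path : List String) :
    List String → PySem.Set String → Option (List String) × PySem.Set String
  | [], visited => (none, visited)                       -- loop fell through: return None
  | nb :: rest, visited =>
    match f (path ++ [nb]) visited with
    | (some result, visited') => (some result, visited') -- if result is not None: return result
    | (none, visited') => tryNbrsB f path rest visited'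

-- B's nested `rec(path)`; fuel 64 strictly exceeds the recursion depth (≤ node count + 2)
def recB (goal : String) : Nat → List String → PySem.Set String →
    Option (List String) × PySem.Set String
  | 0, _, visited => (none, visited)
  | fuel + 1, path, visited =>
    match PySem.List.pyGet? path (-1) with               -- node = path[-1]
    | none => (none, visited)
    | some node =>
      if node == goal then (some path, visited)          -- return path
      else if PySem.Set.contains visited node then (none, visited)   -- return None
      else
        tryNbrsB (recB goal fuel) path
          ((PySem.Dict.getD adjacencyB node []).reverse) -- for neighbor in reversed(adjacency.get(node, []))
          (PySem.Set.add visited node)                   -- visited.add(node)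

def dfs_alt (start : String) (goal : String) : Option (List String) :=
  (recB goal 64 [start] PySem.Set.empty).1               -- return rec([start])

-- ===== PRECONDITION & SPEC =====
def Spec_dfs (start : String) (goal : String) (out : Option (List String)) : Prop := out = dfs_alt start goal
instance (start : String) (goal : String) (out : Option (List String)) : Decidable (Spec_dfs start goal out) := by unfold Spec_dfs; infer_instance

-- ===== CLAIM (what is proved, stated in full; the proofs are below) =====
def Claim_equal_dfs : Prop := ∀ (start : String) (goal : String), Dom_dfs start goal → Spec_dfs start goal (dfs start goal)

-- ===== LEMMAS AND PROOFS =====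

-- the keys of the graph, and the set of all strings that can ever appear in a path
-- ("V" is a neighbour of "U" without being a key)
def keysL : List String := ["A","Z","O","T","L","M","D","C","R","S","F","P","B","U","H","E","G"]
def closureL : List String := keysL ++ ["V"]

lemma graphA_items_keys : ∀ p ∈ graphA.items, p.1 ∈ keysL ∧ ∀ n ∈ p.2.keys, n ∈ closureL := by
  decide

lemma adjB_items_keys : ∀ p ∈ adjacencyB.items, p.1 ∈ keysL ∧ ∀ n ∈ p.2, n ∈ closureL := by
  decide

lemma graph_keys_empty (node : String) (h : node ∉ keysL) :
    (PySem.Dict.getD graphA node PySem.Dict.empty).keys = [] := by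
  have hget : graphA.get? node = none := by
    simp only [PySem.Dict.get?, Option.map_eq_none_iff, List.find?_eq_none]
    intro p hp
    simp only [beq_iff_eq]
    intro hpn
    exact h (hpn ▸ (graphA_items_keys p hp).1)
  simp [PySem.Dict.getD, hget, PySem.Dict.empty, PySem.Dict.keys]

lemma adjB_empty (node : String) (h : node ∉ keysL) :
    PySem.Dict.getD adjacencyB node [] = [] := by
  have hget : adjacencyB.get? node = none := by
    simp only [PySem.Dict.get?, Option.map_eq_none_iff, List.find?_eq_none]
    intro p hp
    simp only [beq_iff_eq]
    intro hpn
    exact h (hpn ▸ (adjB_items_keys p hp).1)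
  simp [PySem.Dict.getD, hget]

lemma graph_nbrs_closure (node : String) :
    ∀ n ∈ (PySem.Dict.getD graphA node PySem.Dict.empty).keys, n ∈ closureL := by
  cases hget : graphA.get? node with
  | none => simp [PySem.Dict.getD, hget, PySem.Dict.empty, PySem.Dict.keys]
  | some d =>
    have : ∃ p ∈ graphA.items, p.2 = d := by
      simp only [PySem.Dict.get?, Option.map_eq_some_iff] at hget
      obtain ⟨p, hp, rfl⟩ := hget
      exact ⟨p, List.mem_of_find?_eq_some hp, rfl⟩
    obtain ⟨p, hp, rfl⟩ := this
    intro n hn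
    exact (graphA_items_keys p hp).2 n (by simpa [PySem.Dict.getD, hget] using hn)

lemma adjB_nbrs_closure (node : String) :
    ∀ n ∈ PySem.Dict.getD adjacencyB node [], n ∈ closureL := by
  cases hget : adjacencyB.get? node with
  | none => simp [PySem.Dict.getD, hget]
  | some l =>
    have : ∃ p ∈ adjacencyB.items, p.2 = l := by
      simp only [PySem.Dict.get?, Option.map_eq_some_iff] at hget
      obtain ⟨p, hp, rfl⟩ := hget
      exact ⟨p, List.mem_of_find?_eq_some hp, rfl⟩
    obtain ⟨p, hp, rfl⟩ := this
    intro n hn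
    exact (adjB_items_keys p hp).2 n (by simpa [PySem.Dict.getD, hget] using hn)

lemma pop?_cons (a : List String) (as : List (List String)) :
    PySem.List.pop? (a :: as) =
      some ((a :: as).getLast (by simp), (a :: as).dropLast) := by
  conv_lhs => rw [← List.dropLast_concat_getLast (l := a :: as) (by simp)]
  exact PySem.List.pop?_last _ _

-- A returns None when the goal is not among the strings a path can contain
lemma loopA_none (goal : String) (hg : goal ∉ closureL) :
    ∀ (fuel : Nat) (stack : List (List String)) (visited : PySem.Set String),
      (∀ p ∈ stack, ∀ x ∈ p, x ∈ closureL) →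
      dfsLoopA goal fuel stack visited = none := by
  intro fuel
  induction fuel with
  | zero => intro stack visited _; rfl
  | succ n ih =>
    intro stack visited hstack
    cases stack with
    | nil => rfl
    | cons a as =>
      rw [dfsLoopA, pop?_cons]
      have hpath : ∀ x ∈ (a :: as).getLast (by simp), x ∈ closureL :=
        hstack _ (List.getLast_mem _)
      have hstack' : ∀ p ∈ (a :: as).dropLast, ∀ x ∈ p, x ∈ closureL :=
        fun p hp => hstack p (List.dropLast_subset _ hp)
      cases hget : PySem.List.pyGet? ((a :: as).getLast (by simp)) (-1) with
      | none => simp only [hget]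
      | some node =>
        have hnode : node ∈ closureL :=
          hpath node (PySem.List.mem_of_pyGet?_eq_some _ hget)
        simp only [hget]
        rw [if_neg (by simp only [beq_iff_eq]; rintro rfl; exact hg hnode)]
        split
        · exact ih _ visited hstack'
        · apply ih
          intro p hp x hx
          rw [PySem.List.foldl_append_singleton_eq_map
            (fun neighbor => (a :: as).getLast (by simp) ++ [neighbor])] at hp
          rcases List.mem_append.mp hp with hp | hp
          · exact hstack' p hp x hx
          · obtain ⟨nb, hnb, rfl⟩ := List.mem_map.mp hp
            rcases List.mem_append.mp hx with hx | hx
            · exact hpath x hx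
            · simp only [List.mem_singleton] at hx; rw [hx]
              exact graph_nbrs_closure node nb hnb

-- B returns None in the same situation
lemma recB_none (goal : String) (hg : goal ∉ closureL) :
    ∀ (fuel : Nat) (path : List String) (visited : PySem.Set String),
      (∀ x ∈ path, x ∈ closureL) → (recB goal fuel path visited).1 = none := by
  intro fuel
  induction fuel with
  | zero => intro path visited _; rfl
  | succ n ih =>
    intro path visited hpath
    rw [recB]
    cases hget : PySem.List.pyGet? path (-1) with
    | none => simp only []
    | some node =>
      have hnode : node ∈ closureL :=
        hpath node (PySem.List.mem_of_pyGet?_eq_some _ hget)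
      simp only []
      rw [if_neg (by simp only [beq_iff_eq]; rintro rfl; exact hg hnode)]
      split
      · rfl
      · -- the neighbour loop stays at `none`
        have key : ∀ (l : List String), (∀ nb ∈ l, nb ∈ closureL) →
            ∀ (v : PySem.Set String),
            (tryNbrsB (recB goal n) path l v).1 = none := by
          intro l hl
          induction l with
          | nil => intro v; rfl
          | cons nb rest ihl =>
            intro v
            rw [tryNbrsB]
            have hb : recB goal n (path ++ [nb]) v =
                (none, (recB goal n (path ++ [nb]) v).2) := by
              refine Prod.ext ?_ rfl
              refine ih (path ++ [nb]) v ?_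
              intro x hx
              rcases List.mem_append.mp hx with hx | hx
              · exact hpath x hx
              · simp only [List.mem_singleton] at hx; rw [hx]
                exact hl nb (by simp)
            rw [hb]
            exact ihl (fun x hx => hl x (by simp [hx])) _
        apply key
        intro nb hnb
        exact adjB_nbrs_closure node nb (List.mem_reverse.mp hnb)

-- the finitely many runs where start is a key and goal can actually occur in a path
lemma grid_eq : ∀ s ∈ keysL, ∀ g ∈ closureL, dfs s g = dfs_alt s g := by decide

lemma dfs_self (s : String) : dfs s s = some [s] := by
  unfold dfs
  rw [show (64 : Nat) = 63 + 1 from rfl, dfsLoopA, pop?_cons]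
  simp [pysem]

lemma dfs_alt_self (s : String) : dfs_alt s s = some [s] := by
  unfold dfs_alt
  rw [show (64 : Nat) = 63 + 1 from rfl, recB]
  simp [pysem]

-- ===== VERDICT (by name: the statement is the Claim_ definition above) =====
theorem dfs_spec : Claim_equal_dfs := by
  intro start goal _
  unfold Spec_dfs
  by_cases h1 : goal = start
  · subst h1; rw [dfs_self, dfs_alt_self]
  · by_cases h2 : start ∈ keysL
    · by_cases h3 : goal ∈ closureL
      · exact grid_eq start h2 goal h3
      · show dfsLoopA goal 64 [[start]] PySem.Set.empty = (recB goal 64 [start] PySem.Set.empty).1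
        rw [loopA_none goal h3 64 [[start]] PySem.Set.empty
            (by intro p hp x hx; simp at hp; subst hp; simp at hx; subst hx
                simp [closureL]; exact Or.inl h2),
          recB_none goal h3 64 [start] PySem.Set.empty
            (by intro x hx; simp at hx; subst hx; simp [closureL]; exact Or.inl h2)]
    · -- start is not a key: both expand nothing and return None (goal ≠ start)
      have hkA := graph_keys_empty start h2
      have hkB := adjB_empty start h2
      have hne : (start == goal) = false := by
        simp only [beq_eq_false_iff_ne]; exact fun h => h1 h.symm
      have hpop1 : PySem.List.pop? [[start]] = some ([start], []) := by
        simpa using PySem.List.pop?_last ([] : List (List String)) [start]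
      show dfsLoopA goal 64 [[start]] PySem.Set.empty = (recB goal 64 [start] PySem.Set.empty).1
      rw [show (64 : Nat) = 63 + 1 from rfl, dfsLoopA, recB, hpop1]
      simp only [PySem.List.pyGet?_neg_one, List.getLast?_singleton, hne, Bool.false_eq_true,
        if_false, hkA, hkB]
      simp [PySem.Set.contains, PySem.Set.empty, PySem.Set.add, tryNbrsB]
      rw [show (63 : Nat) = 62 + 1 from rfl, dfsLoopA]
      rfl
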